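-- pv_equiv track=rewrite | github.com/imrysn/kmti-main | user/components/approval_files_view.py | separate_submissions_by_status
-- ===== SOURCE A (Python) =====
-- def separate_submissions_by_status(submissions):
--     """Separate submissions by status - WITHOUT CHANGES REQUESTED"""
--     pending_submissions = [s for s in submissions if s.get("status") == "pending"]
--     approved_submissions = [s for s in submissions if s.get("status") == "approved"]
--     rejected_submissions = [s for s in submissions if s.get("status") == "rejected"]
--
--     return {
--         "pending": pending_submissions,
--         "approved": approved_submissions,
--         "rejected": rejected_submissions
--     }
-- ===== SOURCE B (Python) =====
-- def separate_submissions_by_status(submissions):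
--     """Separate submissions by status - WITHOUT CHANGES REQUESTED"""
--     result = {"pending": [], "approved": [], "rejected": []}
--     for s in submissions:
--         status = s.get("status")
--         if status in result:
--             result[status].append(s)
--     return result
-- ===== Notes on version B (the rewrite author's own statement) =====
-- stated objective: alternative
-- what changed: Replaces three separate filtering passes over the submissions list with a single grouping pass that dispatches each submission into a pre-initialized bucket dict.
import Mathlib
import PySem

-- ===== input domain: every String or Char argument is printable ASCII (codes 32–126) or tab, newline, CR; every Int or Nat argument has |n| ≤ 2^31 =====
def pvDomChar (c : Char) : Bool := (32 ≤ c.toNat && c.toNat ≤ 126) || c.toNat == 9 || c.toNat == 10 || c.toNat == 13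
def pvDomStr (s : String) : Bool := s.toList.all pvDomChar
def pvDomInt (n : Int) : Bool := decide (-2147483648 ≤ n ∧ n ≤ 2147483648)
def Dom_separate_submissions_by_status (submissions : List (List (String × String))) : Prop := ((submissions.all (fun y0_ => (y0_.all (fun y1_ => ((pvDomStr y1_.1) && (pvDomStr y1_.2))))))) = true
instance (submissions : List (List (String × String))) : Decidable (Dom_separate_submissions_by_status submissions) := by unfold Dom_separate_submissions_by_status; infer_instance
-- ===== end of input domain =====

-- ===== PORT A =====
-- B groups in one pass into a pre-initialized bucket dict instead of A's three filtering passes (different decomposition, same cost).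
-- s.get("status") of a Python dict passed as an association list (first-match lookup)
def sbsIs (st : String) (s : List (String × String)) : Bool :=
  (PySem.Dict.mk s).get? "status" == some st

def separate_submissions_by_status (submissions : List (List (String × String))) : List (String × List (List (String × String))) :=
  let pending_submissions := submissions.filter (sbsIs "pending")
  let approved_submissions := submissions.filter (sbsIs "approved")
  let rejected_submissions := submissions.filter (sbsIs "rejected")
  [("pending", pending_submissions), ("approved", approved_submissions), ("rejected", rejected_submissions)]

-- ===== PORT B =====
def sbsStep (result : PySem.Dict String (List (List (String × String)))) (s : List (String × String)) : PySem.Dict String (List (List (String × String))) :=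
  match (PySem.Dict.mk s).get? "status" with
  | some st => if result.contains st then result.modify st [] (fun l => l ++ [s]) else result
  | none => result

def separate_submissions_by_status_alt (submissions : List (List (String × String))) : List (String × List (List (String × String))) :=
  (submissions.foldl sbsStep (PySem.Dict.ofList [("pending", []), ("approved", []), ("rejected", [])])).items

-- ===== PRECONDITION & SPEC =====
def Spec_separate_submissions_by_status (submissions : List (List (String × String))) (out : List (String × List (List (String × String)))) : Prop := out = separate_submissions_by_status_alt submissions
instance (submissions : List (List (String × String))) (out : List (String × List (List (String × String)))) : Decidable (Spec_separate_submissions_by_status submissions out) := by unfold Spec_separate_submissions_by_status; infer_instance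

-- ===== CLAIM (what is proved, stated in full; the proofs are below) =====
def Claim_equal_separate_submissions_by_status : Prop := ∀ (submissions : List (List (String × String))), Dom_separate_submissions_by_status submissions → Spec_separate_submissions_by_status submissions (separate_submissions_by_status submissions)

-- ===== LEMMAS AND PROOFS =====

-- loop invariant: folding sbsStep over the three-bucket dict appends exactly the filtered sublists
lemma sbs_loop (subs : List (List (String × String))) :
    ∀ p a r : List (List (String × String)),
      subs.foldl sbsStep (PySem.Dict.mk [("pending", p), ("approved", a), ("rejected", r)]) =
        PySem.Dict.mk [("pending", p ++ subs.filter (sbsIs "pending")),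
                       ("approved", a ++ subs.filter (sbsIs "approved")),
                       ("rejected", r ++ subs.filter (sbsIs "rejected"))] := by
  induction subs with
  | nil => simp
  | cons s t ih =>
    intro p a r
    simp only [List.foldl_cons]
    rcases h : (PySem.Dict.mk s).get? "status" with _ | st
    · simp [sbsStep, h, ih, sbsIs]
    · by_cases hp : st = "pending"
      · subst hp
        simp only [sbsStep]
        rw [h]
        simp [ih, PySem.Dict.contains, PySem.Dict.modify, PySem.Dict.insert,
              PySem.Dict.getD, PySem.Dict.get?]
        simp [List.filter_cons, sbsIs, h]
      · by_cases ha : st = "approved"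
        · subst ha
          simp only [sbsStep]
          rw [h]
          simp [ih, PySem.Dict.contains, PySem.Dict.modify, PySem.Dict.insert,
                PySem.Dict.getD, PySem.Dict.get?]
          simp [List.filter_cons, sbsIs, h]
        · by_cases hr : st = "rejected"
          · subst hr
            simp only [sbsStep]
            rw [h]
            simp [ih, PySem.Dict.contains, PySem.Dict.modify, PySem.Dict.insert,
                  PySem.Dict.getD, PySem.Dict.get?]
            simp [List.filter_cons, sbsIs, h]
          · have hno : ¬("pending" = st ∨ "approved" = st ∨ "rejected" = st) := by
              push Not
              exact ⟨fun h' => hp h'.symm, fun h' => ha h'.symm, fun h' => hr h'.symm⟩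
            simp [sbsStep, h, ih, sbsIs, PySem.Dict.contains, hno, hp, ha, hr]

-- ===== VERDICT (by name: the statement is the Claim_ definition above) =====
theorem separate_submissions_by_status_spec : Claim_equal_separate_submissions_by_status := by
  intro subs _
  unfold Spec_separate_submissions_by_status separate_submissions_by_status separate_submissions_by_status_alt
  have e : (PySem.Dict.ofList [("pending", ([] : List (List (String × String)))), ("approved", []), ("rejected", [])]) =
      PySem.Dict.mk [("pending", []), ("approved", []), ("rejected", [])] := by rfl
  rw [e, sbs_loop subs [] [] []]
  simp
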